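-- pv_equiv track=rewrite | github.com/alex-bo/leetcode | Best Time to Buy and Sell Stock III - LeetCode.py | find_profit
-- ===== SOURCE A (Python) =====
-- from typing import List, Tuple
--
-- def find_profit(prices: List[int], start: int, stop: int) -> Tuple[int, int, int]:
--     if start >= len(prices):
--         return 0, 0, 0
--     buy_index = start
--     sell_index = start
--     curr_buy_index = start
--     buy_price = prices[buy_index]
--     max_profit = 0
--     for i in range(start + 1, stop):
--         profit = prices[i] - buy_price
--         if profit > max_profit:
--             sell_index = i
--             buy_index = curr_buy_index
--             max_profit = profit
--         if prices[i] < buy_price: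
--             curr_buy_index = i
--             buy_price = prices[i]
--     return buy_index, sell_index, max_profit
-- ===== SOURCE B (Python) =====
-- from typing import List, Tuple
--
-- def find_profit(prices: List[int], start: int, stop: int) -> Tuple[int, int, int]:
--     if start >= len(prices):
--         return 0, 0, 0
--     # pass 1: min_idx[k] = earliest index of the minimum price over prices[start..start+k]
--     min_idx = []
--     m = start
--     for i in range(start, stop):
--         if prices[i] < prices[m]:
--             m = i
--         min_idx.append(m)
--     # pass 2: best single transaction, buying at the running minimum before each day
--     buy_index = start
--     sell_index = start
--     max_profit = 0
--     for i, m in zip(range(start + 1, stop), min_idx):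
--         profit = prices[i] - prices[m]
--         if profit > max_profit:
--             buy_index = m
--             sell_index = i
--             max_profit = profit
--     return buy_index, sell_index, max_profit
-- ===== Notes on version B (the rewrite author's own statement) =====
-- stated objective: alternative
-- what changed: Replaces A's single pass carrying five interleaved state variables (current buy index/price updated after the profit test) with a two-pass decomposition: first a running-minimum index table min_idx, then a scan that pairs each day with the precomputed earliest-minimum index and updates best buy/sell/profit on strict improvement only.
import Mathlib
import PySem

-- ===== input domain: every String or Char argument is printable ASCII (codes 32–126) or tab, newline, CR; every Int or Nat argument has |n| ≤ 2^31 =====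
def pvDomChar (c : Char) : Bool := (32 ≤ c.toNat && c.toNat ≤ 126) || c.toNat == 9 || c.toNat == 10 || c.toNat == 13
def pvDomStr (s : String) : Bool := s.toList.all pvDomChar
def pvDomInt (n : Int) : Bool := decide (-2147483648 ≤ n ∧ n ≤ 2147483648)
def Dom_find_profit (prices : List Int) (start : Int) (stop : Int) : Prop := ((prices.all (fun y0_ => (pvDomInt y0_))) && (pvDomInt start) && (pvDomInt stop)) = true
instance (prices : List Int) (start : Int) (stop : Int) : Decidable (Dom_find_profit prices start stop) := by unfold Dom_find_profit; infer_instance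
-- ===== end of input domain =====

-- B replaces A's five-variable single pass by a two-pass decomposition (running-minimum index
-- table, then a scan over (day, table entry) pairs); same cost, proved equal on Pre_.

-- ===== PORT A =====
def find_profit (prices : List Int) (start : Int) (stop : Int) : Int × Int × Int :=
  if start ≥ (prices.length : Int) then (0, 0, 0)
  else
    let buy_price := PySem.List.pyGetD prices start 0
    let s := List.foldl (fun (st : Int × Int × Int × Int × Int) i =>
        let bi := st.1; let si := st.2.1; let cb := st.2.2.1
        let bp := st.2.2.2.1; let mp := st.2.2.2.2
        let profit := PySem.List.pyGetD prices i 0 - bp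
        let st1 : Int × Int × Int := if profit > mp then (cb, i, profit) else (bi, si, mp)
        let st2 : Int × Int := if PySem.List.pyGetD prices i 0 < bp then (i, PySem.List.pyGetD prices i 0) else (cb, bp)
        (st1.1, st1.2.1, st2.1, st2.2, st1.2.2))
      (start, start, start, buy_price, 0) (PySem.List.pyRange (start + 1) stop 1)
    (s.1, s.2.1, s.2.2.2.2)

-- ===== PORT B =====
def find_profit_alt (prices : List Int) (start : Int) (stop : Int) : Int × Int × Int :=
  if start ≥ (prices.length : Int) then (0, 0, 0)
  else
    let p1 := List.foldl (fun (st : Int × List Int) i =>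
        let m := if PySem.List.pyGetD prices i 0 < PySem.List.pyGetD prices st.1 0 then i else st.1
        (m, st.2 ++ [m]))
      (start, ([] : List Int)) (PySem.List.pyRange start stop 1)
    let min_idx := p1.2
    List.foldl (fun (st : Int × Int × Int) (im : Int × Int) =>
        let profit := PySem.List.pyGetD prices im.1 0 - PySem.List.pyGetD prices im.2 0
        if profit > st.2.2 then (im.2, im.1, profit) else st)
      (start, start, 0) ((PySem.List.pyRange (start + 1) stop 1).zip min_idx)

-- ===== PRECONDITION & SPEC =====
-- Pre_ excludes exactly the inputs on which A raises IndexError (an index prices[start] or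
-- prices[i], i in range(start+1,stop), outside Python's valid index range).
def Pre_find_profit (prices : List Int) (start : Int) (stop : Int) : Prop :=
  start ≥ (prices.length : Int) ∨ (start ≥ -(prices.length : Int) ∧ stop ≤ (prices.length : Int))
instance (prices : List Int) (start : Int) (stop : Int) : Decidable (Pre_find_profit prices start stop) := by unfold Pre_find_profit; infer_instance
def pvWitness_find_profit : List Int × Int × Int := ([3, 1, 4, 1, 5], 0, 5)

def Spec_find_profit (prices : List Int) (start : Int) (stop : Int) (out : Int × Int × Int) : Prop := out = find_profit_alt prices start stop
instance (prices : List Int) (start : Int) (stop : Int) (out : Int × Int × Int) : Decidable (Spec_find_profit prices start stop out) := by unfold Spec_find_profit; infer_instance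

-- ===== CLAIM (what is proved, stated in full; the proofs are below) =====
def Claim_equal_find_profit : Prop := ∀ (prices : List Int) (start : Int) (stop : Int), Dom_find_profit prices start stop → Pre_find_profit prices start stop → Spec_find_profit prices start stop (find_profit prices start stop)
-- ===== LEMMAS AND PROOFS =====

-- specification of B's pass-1 table as a recursive running-minimum list
def pvMins (prices : List Int) (m : Int) : List Int → List Int
  | [] => []
  | i :: is =>
      let m' := if PySem.List.pyGetD prices i 0 < PySem.List.pyGetD prices m 0 then i else m
      m' :: pvMins prices m' is

theorem pvPass1_acc (prices : List Int) (L : List Int) : ∀ (m : Int) (acc : List Int),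
    (List.foldl (fun (st : Int × List Int) i =>
        let m := if PySem.List.pyGetD prices i 0 < PySem.List.pyGetD prices st.1 0 then i else st.1
        (m, st.2 ++ [m])) (m, acc) L).2 = acc ++ pvMins prices m L := by
  induction L with
  | nil => intro m acc; simp [pvMins]
  | cons i is ih =>
      intro m acc
      simp only [List.foldl, pvMins]
      rw [ih]
      simp

theorem pvMain (prices : List Int) (L : List Int) : ∀ (cb bi si mp : Int),
    (fun (s : Int × Int × Int × Int × Int) => (s.1, s.2.1, s.2.2.2.2))
      (List.foldl (fun (st : Int × Int × Int × Int × Int) i =>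
        let bi := st.1; let si := st.2.1; let cb := st.2.2.1
        let bp := st.2.2.2.1; let mp := st.2.2.2.2
        let profit := PySem.List.pyGetD prices i 0 - bp
        let st1 : Int × Int × Int := if profit > mp then (cb, i, profit) else (bi, si, mp)
        let st2 : Int × Int := if PySem.List.pyGetD prices i 0 < bp then (i, PySem.List.pyGetD prices i 0) else (cb, bp)
        (st1.1, st1.2.1, st2.1, st2.2, st1.2.2))
        (bi, si, cb, PySem.List.pyGetD prices cb 0, mp) L)
    = List.foldl (fun (st : Int × Int × Int) (im : Int × Int) =>
        let profit := PySem.List.pyGetD prices im.1 0 - PySem.List.pyGetD prices im.2 0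
        if profit > st.2.2 then (im.2, im.1, profit) else st)
        (bi, si, mp) (L.zip (cb :: pvMins prices cb L)) := by
  induction L with
  | nil => intro cb bi si mp; rfl
  | cons i is ih =>
      intro cb bi si mp
      simp only [List.zip_cons_cons, List.foldl, pvMins]
      by_cases h1 : PySem.List.pyGetD prices i 0 - PySem.List.pyGetD prices cb 0 > mp
      · by_cases h2 : PySem.List.pyGetD prices i 0 < PySem.List.pyGetD prices cb 0
        · simpa [h1, h2] using
            ih i cb i (PySem.List.pyGetD prices i 0 - PySem.List.pyGetD prices cb 0)
        · simpa [h1, h2] using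
            ih cb cb i (PySem.List.pyGetD prices i 0 - PySem.List.pyGetD prices cb 0)
      · by_cases h2 : PySem.List.pyGetD prices i 0 < PySem.List.pyGetD prices cb 0
        · simpa [h1, h2] using ih i bi si mp
        · simpa [h1, h2] using ih cb bi si mp

-- ===== VERDICT (by name: the statement is the Claim_ definition above) =====
theorem find_profit_spec : Claim_equal_find_profit := by
  intro prices start stop _ hpre
  unfold Spec_find_profit find_profit find_profit_alt
  by_cases hg : start ≥ (prices.length : Int)
  · simp [hg]
  · simp only [hg, if_false]
    by_cases hlt : start < stop
    · rw [PySem.List.pyRange_one_cons hlt]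
      simp only [List.foldl]
      rw [pvPass1_acc]
      simpa using (pvMain prices (PySem.List.pyRange (start + 1) stop 1) start start start 0)
    · have h1 : PySem.List.pyRange (start + 1) stop 1 = [] :=
        PySem.List.pyRange_one_eq_nil (by omega)
      have h2 : PySem.List.pyRange start stop 1 = [] :=
        PySem.List.pyRange_one_eq_nil (by omega)
      simp [h1, h2]
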